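-- pv_equiv track=rewrite | github.com/pacaklu/Kendaxa_MLE_assignment_task | task_1/script.py | clear_paths
-- ===== SOURCE A (Python) =====
-- def is_subset(list1, list2):
--     """check whethet list 1 is subset of list 2
--
--     Args:
--         list1 (list): list of ints
--         list2 (list): list of ints
--
--     Returns:
--         int: 1 if true, 0 if false
--     """
--     count = 0
--
--     for i in list1:
--         if i in list2:
--             count = count + 1
--     if count == len(list1):
--         return 1
--     else:
--         return 0
--
-- def clear_paths(PATHS): # remove PATHS that are supersets to some another path
--     """Idea is to clear from all possible paths between red and blue nodes those paths
--         that are supersets to another path.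
--         For example if we have 2 paths, from A to B and from A to C, whereas
--         path from A to B is subset (subpath) of path from A to C, then keep
--         only path from A to B, because we can be sure that path from A to C wont
--         be in final set of paths
--
--
--     Args:
--         PATHS (list): list of lists (paths) between all possible pairs of blue-red nodes
--
--     Returns:
--         list: filtered list of lists (paths)
--     """
--     to_remove = []
--     cleared = []
--     for index1 in range(len(PATHS)):
--
--         if PATHS[index1] in (to_remove):
--             continue
--         else:
--             cleared.append(PATHS[index1])
--
--
--
--         for index2 in range(index1+1, len(PATHS)):
--             if is_subset(PATHS[index1], PATHS[index2]) == 1: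
--                 to_remove.append(PATHS[index2])
--
--     return cleared
-- ===== SOURCE B (Python) =====
-- def _covers(small, big):
--     return all(i in big for i in small)
--
-- def clear_paths(PATHS):
--     cleared = []
--     for path in PATHS:
--         if not any(_covers(kept, path) for kept in cleared):
--             cleared.append(path)
--     return cleared
-- ===== Notes on version B (the rewrite author's own statement) =====
-- stated objective: faster
-- what changed: Replaces A's forward to_remove blacklist (outer index loop plus an inner scan over the whole remaining suffix, and a membership scan of the growing blacklist per path) with a single pass that tests each path only against the already-accepted result list; the counting is_subset helper becomes a direct all(...) test.
import Mathlib
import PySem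

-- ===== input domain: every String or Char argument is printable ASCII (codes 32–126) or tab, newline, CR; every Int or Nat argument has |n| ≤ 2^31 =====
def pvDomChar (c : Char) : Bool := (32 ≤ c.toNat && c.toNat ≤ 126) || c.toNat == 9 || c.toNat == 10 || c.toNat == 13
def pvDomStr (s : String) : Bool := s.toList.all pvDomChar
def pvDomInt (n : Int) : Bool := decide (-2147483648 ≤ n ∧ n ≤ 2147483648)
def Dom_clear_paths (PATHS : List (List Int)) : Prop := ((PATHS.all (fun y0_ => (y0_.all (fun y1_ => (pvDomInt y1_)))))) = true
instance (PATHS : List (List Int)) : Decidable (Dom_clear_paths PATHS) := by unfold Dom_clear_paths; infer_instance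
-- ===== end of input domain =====

-- B replaces A's forward to_remove blacklist by a single pass that keeps a path iff no
-- already-kept path is a subset of it; measured faster (no suffix scan / blacklist scan).

-- ===== PORT A =====
-- is_subset: count how many elements of list1 occur in list2; return 1 iff count == len(list1)
def is_subset (list1 list2 : List Int) : Int :=
  let count := list1.foldl (fun count i => if i ∈ list2 then count + 1 else count) 0
  if count = (list1.length : Int) then 1 else 0

-- the outer 'for index1 in range(len(PATHS))' walks the list front to back; at step index1
-- the inner 'for index2 in range(index1+1, len(PATHS))' iterates exactly the remaining suffix,
-- so we recurse on the suffix carrying (to_remove, cleared)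
def clearPathsGoA (to_remove cleared : List (List Int)) : List (List Int) → List (List Int)
  | [] => cleared
  | p :: rest =>
    if p ∈ to_remove then
      clearPathsGoA to_remove cleared rest
    else
      clearPathsGoA
        (rest.foldl (fun tr q => if is_subset p q = 1 then tr ++ [q] else tr) to_remove)
        (cleared ++ [p]) rest

def clear_paths (PATHS : List (List Int)) : List (List Int) :=
  clearPathsGoA [] [] PATHS

-- ===== PORT B =====
def coversB (small big : List Int) : Bool :=
  small.all (fun i => decide (i ∈ big))

def clearPathsGoB (cleared : List (List Int)) : List (List Int) → List (List Int)
  | [] => cleared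
  | path :: rest =>
    if cleared.any (fun kept => coversB kept path) then
      clearPathsGoB cleared rest
    else
      clearPathsGoB (cleared ++ [path]) rest

def clear_paths_alt (PATHS : List (List Int)) : List (List Int) :=
  clearPathsGoB [] PATHS

-- ===== PRECONDITION & SPEC =====
def Spec_clear_paths (PATHS : List (List Int)) (out : List (List Int)) : Prop := out = clear_paths_alt PATHS
instance (PATHS : List (List Int)) (out : List (List Int)) : Decidable (Spec_clear_paths PATHS out) := by unfold Spec_clear_paths; infer_instance

-- ===== CLAIM (what is proved, stated in full; the proofs are below) =====
def Claim_equal_clear_paths : Prop := ∀ (PATHS : List (List Int)), Dom_clear_paths PATHS → Spec_clear_paths PATHS (clear_paths PATHS)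

-- ===== LEMMAS AND PROOFS =====

theorem isSubset_eq_one_iff (l1 l2 : List Int) :
    is_subset l1 l2 = 1 ↔ ∀ i ∈ l1, i ∈ l2 := by
  have hfold : l1.foldl (fun count i => if i ∈ l2 then count + 1 else count) 0
      = (l1.countP (fun i => decide (i ∈ l2)) : Int) := by
    rw [PySem.List.foldl_ite_add_one (fun i => i ∈ l2)]; ring
  have hiff := List.countP_eq_length (p := fun i => decide (i ∈ l2)) (l := l1)
  simp only [is_subset, hfold]
  constructor
  · intro h
    split at h
    · next hc =>
      intro i hi
      simpa using hiff.mp (by exact_mod_cast hc) i hi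
    · simp at h
  · intro h
    have : l1.countP (fun i => decide (i ∈ l2)) = l1.length := hiff.mpr (by simpa using h)
    simp [this]

theorem coversB_iff (q x : List Int) : coversB q x = true ↔ ∀ i ∈ q, i ∈ x := by
  simp [coversB]

-- the invariant tying A's blacklist to B's accepted list
def clearPathsInv (to_remove cleared l : List (List Int)) : Prop :=
  (∀ x ∈ to_remove, ∃ q ∈ cleared, ∀ i ∈ q, i ∈ x) ∧
  (∀ x ∈ l, (∃ q ∈ cleared, ∀ i ∈ q, i ∈ x) → x ∈ to_remove)

theorem clearPathsGo_eq (l : List (List Int)) :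
    ∀ to_remove cleared, clearPathsInv to_remove cleared l →
      clearPathsGoA to_remove cleared l = clearPathsGoB cleared l := by
  induction l with
  | nil => intro _ _ _; rfl
  | cons p rest ih =>
    intro to_remove cleared hinv
    obtain ⟨h1, h2⟩ := hinv
    by_cases hc : ∃ q ∈ cleared, ∀ i ∈ q, i ∈ p
    · -- both skip p
      have hmem : p ∈ to_remove := h2 p (List.mem_cons_self ..) hc
      have hany : cleared.any (fun kept => coversB kept p) = true := by
        obtain ⟨q, hq, hcov⟩ := hc
        exact List.any_eq_true.mpr ⟨q, hq, (coversB_iff q p).mpr hcov⟩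
      rw [clearPathsGoA, clearPathsGoB, if_pos hmem, if_pos hany]
      exact ih _ _ ⟨h1, fun x hx => h2 x (List.mem_cons_of_mem _ hx)⟩
    · -- both keep p
      have hnmem : p ∉ to_remove := fun hm => hc (h1 p hm)
      have hany : cleared.any (fun kept => coversB kept p) = false := by
        rw [← Bool.not_eq_true, List.any_eq_true]
        rintro ⟨q, hq, hcov⟩
        exact hc ⟨q, hq, (coversB_iff q p).mp hcov⟩
      rw [clearPathsGoA, clearPathsGoB, if_neg hnmem, if_neg (by simp [hany])]
      rw [PySem.List.foldl_append_ite_eq_filter]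
      apply ih
      constructor
      · intro x hx
        rcases List.mem_append.mp hx with hx | hx
        · obtain ⟨q, hq, hcov⟩ := h1 x hx
          exact ⟨q, List.mem_append_left _ hq, hcov⟩
        · have := List.of_mem_filter hx
          exact ⟨p, List.mem_append_right _ (List.mem_singleton.mpr rfl),
            (isSubset_eq_one_iff p x).mp (by simpa using this)⟩
      · intro x hx hex
        obtain ⟨q, hq, hcov⟩ := hex
        rcases List.mem_append.mp hq with hq | hq
        · exact List.mem_append_left _ (h2 x (List.mem_cons_of_mem _ hx) ⟨q, hq, hcov⟩)
        · have hqp : q = p := List.mem_singleton.mp hq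
          subst hqp
          exact List.mem_append_right _
            (List.mem_filter.mpr ⟨hx, by simp [(isSubset_eq_one_iff q x).mpr hcov]⟩)

-- ===== VERDICT (by name: the statement is the Claim_ definition above) =====
theorem clear_paths_spec : Claim_equal_clear_paths := by
  intro PATHS _
  unfold Spec_clear_paths clear_paths clear_paths_alt
  exact clearPathsGo_eq PATHS [] [] ⟨by simp, by simp⟩
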